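-- pv_equiv track=rewrite | github.com/etiennecha/master_code | code_gasoline_france/data_acquisition/format_open_data/read_xml.py | clean_str
-- ===== SOURCE A (Python) =====
-- def clean_str(word):
--   ls_replace = [(u'&#xC0;' , u'À'),
--                 (u'&#xE0;' , u'à'),
--                 (u'&#xC2;' , u'Â'),
--                 (u'&#xE2;' , u'â'),
--                 (u'&#xC6;' , u'Æ'),
--                 (u'&#xE6;' , u'æ'),
--                 (u'&#xC7;' , u'Ç'),
--                 (u'&#xE7;' , u'ç'),
--                 (u'&#xC8;' , u'È'),
--                 (u'&#xE8;' , u'è'),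
--                 (u'&#xC9;' , u'É'),
--                 (u'&#xE9;' , u'é'),
--                 (u'&#xCA;' , u'Ê'),
--                 (u'&#xEA;' , u'ê'),
--                 (u'&#xCB;' , u'Ë'),
--                 (u'&#xEB;' , u'ë'),
--                 (u'&#xCE;' , u'Î'),
--                 (u'&#xEE;' , u'î'),
--                 (u'&#xCF;' , u'Ï'),
--                 (u'&#xEF;' , u'ï'),
--                 (u'&#xD4;' , u'Ô'),
--                 (u'&#xF4;' , u'ô'),
--                 (u'&#x152;', u'Œ'),
--                 (u'&#x153;', u'œ'),
--                 (u'&#xD9;' , u'Ù'),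
--                 (u'&#xF9;' , u'ù'),
--                 (u'&#xDB;' , u'Û'),
--                 (u'&#xFB;' , u'û'),
--                 (u'&#xDC;' , u'Ü'),
--                 (u'&#xFC;' , u'ü'),
--                 (u'&#xAB;' , u'«'),
--                 (u'&#xBB;' , u'»')]
--   for old, new in ls_replace:
--     word = word.replace(old, new)
--   return word
-- ===== SOURCE B (Python) =====
-- # Single left-to-right scan: at each position try the entity table as a prefix
-- # (instead of A's 32 full-string .replace passes).
-- _LS_REPLACE = [(u'&#xC0;', u'\u00C0'), (u'&#xE0;', u'\u00E0'),
--                (u'&#xC2;', u'\u00C2'), (u'&#xE2;', u'\u00E2'),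
--                (u'&#xC6;', u'\u00C6'), (u'&#xE6;', u'\u00E6'),
--                (u'&#xC7;', u'\u00C7'), (u'&#xE7;', u'\u00E7'),
--                (u'&#xC8;', u'\u00C8'), (u'&#xE8;', u'\u00E8'),
--                (u'&#xC9;', u'\u00C9'), (u'&#xE9;', u'\u00E9'),
--                (u'&#xCA;', u'\u00CA'), (u'&#xEA;', u'\u00EA'),
--                (u'&#xCB;', u'\u00CB'), (u'&#xEB;', u'\u00EB'),
--                (u'&#xCE;', u'\u00CE'), (u'&#xEE;', u'\u00EE'),
--                (u'&#xCF;', u'\u00CF'), (u'&#xEF;', u'\u00EF'),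
--                (u'&#xD4;', u'\u00D4'), (u'&#xF4;', u'\u00F4'),
--                (u'&#x152;', u'\u0152'), (u'&#x153;', u'\u0153'),
--                (u'&#xD9;', u'\u00D9'), (u'&#xF9;', u'\u00F9'),
--                (u'&#xDB;', u'\u00DB'), (u'&#xFB;', u'\u00FB'),
--                (u'&#xDC;', u'\u00DC'), (u'&#xFC;', u'\u00FC'),
--                (u'&#xAB;', u'\u00AB'), (u'&#xBB;', u'\u00BB')]
--
-- def clean_str(word):
--   out = []
--   i = 0
--   n = len(word)
--   while i < n:
--     for old, new in _LS_REPLACE: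
--       if word.startswith(old, i):
--         out.append(new)
--         i += len(old)
--         break
--     else:
--       out.append(word[i])
--       i += 1
--   return ''.join(out)
-- ===== Notes on version B (the rewrite author's own statement) =====
-- stated objective: alternative
-- what changed: A makes 32 sequential full-string .replace passes (one per entity); B makes a single left-to-right scan over the string, substituting an entity the moment its key matches as a prefix, which is equivalent because no entity key overlaps another and replacement characters never re-form an entity.
import Mathlib
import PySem

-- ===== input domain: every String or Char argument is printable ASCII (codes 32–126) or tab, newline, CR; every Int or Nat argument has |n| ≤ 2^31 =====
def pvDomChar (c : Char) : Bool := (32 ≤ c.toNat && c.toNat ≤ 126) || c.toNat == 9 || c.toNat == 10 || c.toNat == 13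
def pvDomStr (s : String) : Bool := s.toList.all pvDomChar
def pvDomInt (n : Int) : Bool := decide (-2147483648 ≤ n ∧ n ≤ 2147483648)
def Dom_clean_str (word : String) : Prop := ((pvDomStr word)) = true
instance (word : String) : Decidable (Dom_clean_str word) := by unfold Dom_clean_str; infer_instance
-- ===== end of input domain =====

-- B replaces A's 32 sequential full-string .replace passes by ONE left-to-right scan
-- that substitutes an entity the moment its key matches as a prefix; return values proved equal.

-- ===== PORT A =====
def clean_str (word : String) : String :=
  let ls_replace : List (String × String) :=
    [("&#xC0;", "À"), ("&#xE0;", "à"), ("&#xC2;", "Â"), ("&#xE2;", "â"),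
     ("&#xC6;", "Æ"), ("&#xE6;", "æ"), ("&#xC7;", "Ç"), ("&#xE7;", "ç"),
     ("&#xC8;", "È"), ("&#xE8;", "è"), ("&#xC9;", "É"), ("&#xE9;", "é"),
     ("&#xCA;", "Ê"), ("&#xEA;", "ê"), ("&#xCB;", "Ë"), ("&#xEB;", "ë"),
     ("&#xCE;", "Î"), ("&#xEE;", "î"), ("&#xCF;", "Ï"), ("&#xEF;", "ï"),
     ("&#xD4;", "Ô"), ("&#xF4;", "ô"), ("&#x152;", "Œ"), ("&#x153;", "œ"),
     ("&#xD9;", "Ù"), ("&#xF9;", "ù"), ("&#xDB;", "Û"), ("&#xFB;", "û"),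
     ("&#xDC;", "Ü"), ("&#xFC;", "ü"), ("&#xAB;", "«"), ("&#xBB;", "»")]
  ls_replace.foldl (fun w p => PySem.Str.replace w p.1 p.2) word

-- ===== PORT B =====
-- the entity table of Source B, at char-list level (Source B's pairs, each value a 1-char string)
def entTable : List (List Char × List Char) :=
    [(['&', '#', 'x', 'C', '0', ';'], ['À']),
    (['&', '#', 'x', 'E', '0', ';'], ['à']),
    (['&', '#', 'x', 'C', '2', ';'], ['Â']),
    (['&', '#', 'x', 'E', '2', ';'], ['â']),
    (['&', '#', 'x', 'C', '6', ';'], ['Æ']),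
    (['&', '#', 'x', 'E', '6', ';'], ['æ']),
    (['&', '#', 'x', 'C', '7', ';'], ['Ç']),
    (['&', '#', 'x', 'E', '7', ';'], ['ç']),
    (['&', '#', 'x', 'C', '8', ';'], ['È']),
    (['&', '#', 'x', 'E', '8', ';'], ['è']),
    (['&', '#', 'x', 'C', '9', ';'], ['É']),
    (['&', '#', 'x', 'E', '9', ';'], ['é']),
    (['&', '#', 'x', 'C', 'A', ';'], ['Ê']),
    (['&', '#', 'x', 'E', 'A', ';'], ['ê']),
    (['&', '#', 'x', 'C', 'B', ';'], ['Ë']),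
    (['&', '#', 'x', 'E', 'B', ';'], ['ë']),
    (['&', '#', 'x', 'C', 'E', ';'], ['Î']),
    (['&', '#', 'x', 'E', 'E', ';'], ['î']),
    (['&', '#', 'x', 'C', 'F', ';'], ['Ï']),
    (['&', '#', 'x', 'E', 'F', ';'], ['ï']),
    (['&', '#', 'x', 'D', '4', ';'], ['Ô']),
    (['&', '#', 'x', 'F', '4', ';'], ['ô']),
    (['&', '#', 'x', '1', '5', '2', ';'], ['Œ']),
    (['&', '#', 'x', '1', '5', '3', ';'], ['œ']),
    (['&', '#', 'x', 'D', '9', ';'], ['Ù']),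
    (['&', '#', 'x', 'F', '9', ';'], ['ù']),
    (['&', '#', 'x', 'D', 'B', ';'], ['Û']),
    (['&', '#', 'x', 'F', 'B', ';'], ['û']),
    (['&', '#', 'x', 'D', 'C', ';'], ['Ü']),
    (['&', '#', 'x', 'F', 'C', ';'], ['ü']),
    (['&', '#', 'x', 'A', 'B', ';'], ['«']),
    (['&', '#', 'x', 'B', 'B', ';'], ['»'])]

-- the inner `for old, new in _LS_REPLACE: if word.startswith(old, i): ... break / else:` loop
def firstMatch (l : List Char) : List (List Char × List Char) → Option (List Char × List Char)
  | [] => none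
  | p :: ps => if p.1.isPrefixOf l then some p else firstMatch l ps

-- the `while i < n` scan of Source B over the remaining suffix; `i += len(old)` is the drop
-- (every key of entTable is nonempty, so dropping `len(old)-1` from the tail is exact)
def scanB : List Char → List Char
  | [] => []
  | c :: t =>
    match firstMatch (c :: t) entTable with
    | some p => p.2 ++ scanB (t.drop (p.1.length - 1))
    | none => c :: scanB t
termination_by l => l.length
decreasing_by
  · simp only [List.length_cons]
    have := List.length_drop (l := t) (i := p.1.length - 1)
    omega
  · simp

def clean_str_alt (word : String) : String := String.ofList (scanB word.toList)

-- ===== PRECONDITION & SPEC =====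
def Spec_clean_str (word : String) (out : String) : Prop := out = clean_str_alt word
instance (word : String) (out : String) : Decidable (Spec_clean_str word out) := by unfold Spec_clean_str; infer_instance

-- ===== CLAIM (what is proved, stated in full; the proofs are below) =====
def Claim_equal_clean_str : Prop := ∀ (word : String), Dom_clean_str word → Spec_clean_str word (clean_str word)


-- ===== LEMMAS AND PROOFS =====

-- Python str.replace (nonempty pattern) as direct structural recursion, the proofs' view of `Chars.replace`
def rep (k v : List Char) : List Char → List Char
  | [] => []
  | c :: t => if k.isPrefixOf (c :: t) then v ++ rep k v (t.drop (k.length - 1)) else c :: rep k v t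
termination_by l => l.length
decreasing_by
  · simp only [List.length_cons]
    have := List.length_drop (l := t) (i := k.length - 1)
    omega
  · simp

theorem go_eq_rep (k v : List Char) (hk : k ≠ []) :
    ∀ (fuel : Nat) (l acc : List Char), l.length ≤ fuel →
      PySem.Chars.replace.go k v fuel l acc = acc.reverse ++ rep k v l := by
  intro fuel
  induction fuel with
  | zero =>
    intro l acc h
    have : l = [] := by cases l <;> simp_all
    subst this
    simp [PySem.Chars.replace.go, rep]
  | succ n ih =>
    intro l acc h
    cases l with
    | nil => simp [PySem.Chars.replace.go, rep]
    | cons c t =>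
      rw [PySem.Chars.replace.go]
      by_cases hp : k.isPrefixOf (c :: t)
      · obtain ⟨d, m, rfl⟩ : ∃ d m, k = d :: m := by
          cases k with
          | nil => exact absurd rfl hk
          | cons d m => exact ⟨d, m, rfl⟩
        simp only [hp, if_true]
        rw [List.length_cons, List.drop_succ_cons,
          ih _ _ (by simp only [List.length_drop]; simp only [List.length_cons] at h; omega)]
        rw [rep]
        simp [hp]
      · simp only [hp]
        rw [ih t (c :: acc) (by simp only [List.length_cons] at h; omega)]
        rw [rep]
        simp [hp]

theorem replace_eq_rep (l k v : List Char) (hk : k.isEmpty = false) :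
    PySem.Chars.replace l k v = rep k v l := by
  rw [PySem.Chars.replace, hk]
  simpa using go_eq_rep k v (by cases k <;> simp_all) l.length l [] le_rfl

theorem rep_nil (k v : List Char) : rep k v [] = [] := by rw [rep]

theorem rep_pass {k : List Char} (v : List Char) {c : Char} {t : List Char}
    (h : ¬ k <+: (c :: t)) : rep k v (c :: t) = c :: rep k v t := by
  rw [rep, if_neg (by simpa [List.isPrefixOf_iff_prefix] using h)]

theorem rep_match {k : List Char} (v : List Char) (u : List Char) (hk : k ≠ []) :
    rep k v (k ++ u) = v ++ rep k v u := by
  obtain ⟨d, m, rfl⟩ : ∃ d m, k = d :: m := by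
    cases k with
    | nil => exact absurd rfl hk
    | cons d m => exact ⟨d, m, rfl⟩
  rw [List.cons_append, rep, if_pos (by simp [List.isPrefixOf_iff_prefix])]
  simp

theorem rep_pass_head {k : List Char} (v : List Char) {c : Char} {t : List Char}
    (hk : k.head? = some '&') (hc : c ≠ '&') : rep k v (c :: t) = c :: rep k v t := by
  apply rep_pass
  intro h
  cases k with
  | nil => simp at hk
  | cons d m =>
    obtain ⟨u, hu⟩ := h
    simp at hu hk
    exact hc (hu.1 ▸ hk)

theorem rep_pass_seg {k : List Char} (v : List Char) {m : List Char} (u : List Char)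
    (hm : ∀ c ∈ m, c ≠ '&') (hk : k.head? = some '&') :
    rep k v (m ++ u) = m ++ rep k v u := by
  induction m with
  | nil => simp
  | cons c t ih =>
    rw [List.cons_append, rep_pass_head v hk (hm c (by simp)),
      ih (fun c hc => hm c (by simp [hc]))]
    simp

-- prefix reflection: an all-ASCII list that prefixes the output of `rep k v` (v nonempty,
-- all non-ASCII) already prefixes the input
theorem prefix_rep {k v : List Char} (hv : v ≠ []) (hva : ∀ c ∈ v, 128 ≤ c.toNat) :
    ∀ l s : List Char, (∀ c ∈ s, c.toNat < 128) → s <+: rep k v l → s <+: l := by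
  intro l
  fun_induction rep k v l with
  | case1 => simp
  | case2 c t hp ih =>
    intro s hs hpre
    cases s with
    | nil => simp
    | cons a s' =>
      obtain ⟨b, v', rfl⟩ : ∃ b v', v = b :: v' := by
        cases v with
        | nil => exact absurd rfl hv
        | cons b v' => exact ⟨b, v', rfl⟩
      obtain ⟨u, hu⟩ := hpre
      simp at hu
      obtain ⟨h1, -⟩ := hu
      have h2 := hva b (by simp)
      have h3 := hs a (by simp)
      rw [h1] at h3
      omega
  | case3 c t hp ih =>
    intro s hs hpre
    cases s with
    | nil => simp
    | cons a s' =>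
      obtain ⟨u, hu⟩ := hpre
      simp at hu
      obtain ⟨rfl, hu2⟩ := hu
      have : s' <+: rep k v t := ⟨u, hu2⟩
      have := ih s' (fun c hc => hs c (by simp [hc])) this
      exact List.cons_prefix_cons.mpr ⟨rfl, this⟩

def stepA (w : List Char) (p : List Char × List Char) : List Char := rep p.1 p.2 w

def GoodP (p : List Char × List Char) : Prop :=
  p.1.head? = some '&' ∧ (∀ c ∈ p.1.tail, c ≠ '&') ∧ (∀ c ∈ p.1, c.toNat < 128) ∧
    p.2 ≠ [] ∧ (∀ c ∈ p.2, 128 ≤ c.toNat)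

def goodB (p : List Char × List Char) : Bool :=
  p.1.head? == some '&' && p.1.tail.all (fun c => c != '&') &&
    p.1.all (fun c => decide (c.toNat < 128)) && !p.2.isEmpty &&
    p.2.all (fun c => decide (128 ≤ c.toNat))

theorem ent_goodB : entTable.all goodB = true := by decide

theorem goodB_spec {p : List Char × List Char} (h : goodB p = true) : GoodP p := by
  rw [goodB] at h
  simp only [Bool.and_eq_true, beq_iff_eq, List.all_eq_true, bne_iff_ne, Bool.not_eq_eq_eq_not,
    Bool.not_true, List.isEmpty_eq_false_iff, decide_eq_true_eq] at h
  exact ⟨h.1.1.1.1, h.1.1.1.2, h.1.1.2, h.1.2, h.2⟩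

theorem ent_good : ∀ p ∈ entTable, GoodP p := by
  intro p hp
  exact goodB_spec (List.all_eq_true.mp ent_goodB p hp)

theorem ent_npB : (entTable.all fun p => entTable.all fun q =>
    (p.1 == q.1 || !(p.1.isPrefixOf q.1))) = true := by decide

theorem ent_np : ∀ p ∈ entTable, ∀ q ∈ entTable, p.1 ≠ q.1 → ¬ p.1 <+: q.1 := by
  intro p hp q hq hne hc
  have := List.all_eq_true.mp (List.all_eq_true.mp ent_npB p hp) q hq
  rw [← List.isPrefixOf_iff_prefix] at hc
  simp only [Bool.or_eq_true, beq_iff_eq, Bool.not_eq_eq_eq_not, Bool.not_true] at this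
  rcases this with h | h
  · exact hne h
  · rw [h] at hc
    exact Bool.false_ne_true hc

theorem key_ne_nil {p : List Char × List Char} (h : GoodP p) : p.1 ≠ [] := by
  intro hn
  have := h.1
  rw [hn] at this
  simp at this

theorem np_lift {a b : List Char} (h1 : ¬ a <+: b) (h2 : ¬ b <+: a) :
    ∀ u, ¬ a <+: b ++ u := by
  intro u h
  by_cases hl : a.length ≤ b.length
  · exact h1 (List.prefix_of_prefix_length_le h (List.prefix_append b u) hl)
  · exact h2 (List.prefix_of_prefix_length_le (List.prefix_append b u) h (by omega))

theorem G0 (T : List (List Char × List Char)) : List.foldl stepA [] T = [] := by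
  induction T with
  | nil => rfl
  | cons p ps ih => rw [List.foldl_cons, stepA, rep_nil, ih]

theorem G1 {c : Char} (hc : c ≠ '&') (T : List (List Char × List Char))
    (h : ∀ p ∈ T, p.1.head? = some '&') :
    ∀ u, List.foldl stepA (c :: u) T = c :: List.foldl stepA u T := by
  induction T with
  | nil => simp
  | cons p ps ih =>
    intro u
    rw [List.foldl_cons, List.foldl_cons, stepA, rep_pass_head p.2 (h p (by simp)) hc]
    exact ih (fun q hq => h q (by simp [hq])) (rep p.1 p.2 u)

theorem G1seg {m : List Char} (hm : ∀ c ∈ m, c ≠ '&') (T : List (List Char × List Char))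
    (h : ∀ p ∈ T, p.1.head? = some '&') :
    ∀ u, List.foldl stepA (m ++ u) T = m ++ List.foldl stepA u T := by
  induction m with
  | nil => simp
  | cons c t ih =>
    intro u
    rw [List.cons_append, G1 (hm c (by simp)) T h, ih (fun c hc => hm c (by simp [hc]))]
    simp

theorem G2 (T : List (List Char × List Char)) (hT : ∀ p ∈ T, GoodP p) :
    ∀ u, (∀ p ∈ T, ¬ p.1 <+: ('&' :: u)) →
      List.foldl stepA ('&' :: u) T = '&' :: List.foldl stepA u T := by
  induction T with
  | nil => simp
  | cons p ps ih =>
    intro u h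
    rw [List.foldl_cons, List.foldl_cons, stepA, rep_pass p.2 (h p (by simp))]
    refine ih (fun q hq => hT q (by simp [hq])) _ ?_
    intro q hq hcon
    obtain ⟨hqh, hqt, hqa, -, -⟩ := hT q (by simp [hq])
    obtain ⟨d, mq, hq1⟩ : ∃ d mq, q.1 = d :: mq := by
      cases hq1 : q.1 with
      | nil => rw [hq1] at hqh; simp at hqh
      | cons d mq => exact ⟨d, mq, rfl⟩
    have hd : d = '&' := by rw [hq1] at hqh; simpa using hqh
    subst hd
    have hmq : mq <+: rep p.1 p.2 u := (List.cons_prefix_cons.mp (hq1 ▸ hcon)).2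
    obtain ⟨-, -, -, hv, hva⟩ := hT p (by simp)
    have hmu : mq <+: u :=
      prefix_rep hv hva u mq (fun c hc => hqa c (by rw [hq1]; simp [hc])) hmq
    refine h q (by simp [hq]) ?_
    rw [hq1]
    exact List.cons_prefix_cons.mpr ⟨rfl, hmu⟩

theorem G3 {k : List Char} (hkh : k.head? = some '&') (hkt : ∀ c ∈ k.tail, c ≠ '&')
    (T : List (List Char × List Char)) (hT : ∀ p ∈ T, p.1.head? = some '&')
    (h : ∀ p ∈ T, ∀ u', ¬ p.1 <+: k ++ u') :
    ∀ u, List.foldl stepA (k ++ u) T = k ++ List.foldl stepA u T := by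
  obtain ⟨d, m, rfl⟩ : ∃ d m, k = d :: m := by
    cases hk1 : k with
    | nil => rw [hk1] at hkh; simp at hkh
    | cons d m => exact ⟨d, m, rfl⟩
  have hd : d = '&' := by simpa using hkh
  subst hd
  induction T with
  | nil => simp
  | cons p ps ih =>
    intro u
    rw [List.foldl_cons, List.foldl_cons, stepA, List.cons_append,
      rep_pass p.2 (by simpa using h p (by simp) u),
      rep_pass_seg p.2 u (by simpa using hkt) (hT p (by simp))]
    exact ih (fun q hq => hT q (by simp [hq])) (fun q hq u' => h q (by simp [hq]) u')
      (rep p.1 p.2 u)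

theorem FM_none {l : List Char} :
    ∀ T, firstMatch l T = none → ∀ p ∈ T, ¬ p.1 <+: l := by
  intro T
  induction T with
  | nil => simp
  | cons q qs ih =>
    intro h p hp
    rw [firstMatch] at h
    by_cases hq : q.1.isPrefixOf l
    · simp [hq] at h
    · simp [hq] at h
      rcases List.mem_cons.mp hp with hp1 | hp1
      · subst hp1
        simpa [List.isPrefixOf_iff_prefix] using hq
      · exact ih h p hp1

theorem FM_some {l : List Char} {p : List Char × List Char} :
    ∀ T, firstMatch l T = some p →
      ∃ T₁ T₂, T = T₁ ++ p :: T₂ ∧ (∀ q ∈ T₁, ¬ q.1 <+: l) ∧ p.1 <+: l := by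
  intro T
  induction T with
  | nil => simp [firstMatch]
  | cons q qs ih =>
    intro h
    rw [firstMatch] at h
    by_cases hq : q.1.isPrefixOf l
    · simp [hq] at h
      subst h
      exact ⟨[], qs, by simp, by simp, List.isPrefixOf_iff_prefix.mp hq⟩
    · simp [hq] at h
      obtain ⟨T₁, T₂, hT, hT₁, hpre⟩ := ih h
      refine ⟨q :: T₁, T₂, by simp [hT], ?_, hpre⟩
      intro r hr
      rcases List.mem_cons.mp hr with hr1 | hr1
      · subst hr1
        simpa [List.isPrefixOf_iff_prefix] using hq
      · exact hT₁ r hr1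

theorem main_scan : ∀ l : List Char, List.foldl stepA l entTable = scanB l := by
  intro l
  fun_induction scanB l with
  | case1 => rw [G0]

  | case2 c t p hfm ih =>
    obtain ⟨T₁, T₂, hT, hT₁, hpre⟩ := FM_some entTable hfm
    have hpmem : p ∈ entTable := by rw [hT]; simp
    obtain ⟨hph, hpt, hpa, hv, hva⟩ := ent_good p hpmem
    obtain ⟨d, m, hp1⟩ : ∃ d m, p.1 = d :: m := by
      cases hp1 : p.1 with
      | nil => rw [hp1] at hph; simp at hph
      | cons d m => exact ⟨d, m, rfl⟩
    obtain ⟨u, hu⟩ := hpre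
    have hpre2 : p.1 <+: c :: t := ⟨u, hu⟩
    have hdrop : t.drop (p.1.length - 1) = u := by
      rw [hp1] at hu
      simp at hu
      rw [hp1]
      simp [← hu.2]
    have hnp : ∀ q ∈ T₁, ∀ u', ¬ q.1 <+: p.1 ++ u' := by
      intro q hq u'
      have hqmem : q ∈ entTable := by rw [hT]; simp [hq]
      have hne : q.1 ≠ p.1 := by
        intro he
        exact hT₁ q hq (he ▸ hpre2)
      exact np_lift (fun hc => hT₁ q hq (hc.trans hpre2)) (ent_np p hpmem q hqmem (Ne.symm hne)) u'
    calc List.foldl stepA (c :: t) entTable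
        = List.foldl stepA (p.1 ++ u) (T₁ ++ p :: T₂) := by rw [hu, hT]
      _ = List.foldl stepA (stepA (p.1 ++ List.foldl stepA u T₁) p) T₂ := by
          rw [List.foldl_append, G3 hph hpt T₁ (fun q hq => (ent_good q (by rw [hT]; simp [hq])).1) hnp, List.foldl_cons]
      _ = List.foldl stepA (p.2 ++ rep p.1 p.2 (List.foldl stepA u T₁)) T₂ := by
          rw [stepA, rep_match p.2 _ (key_ne_nil (ent_good p hpmem))]
      _ = p.2 ++ List.foldl stepA u entTable := by
          rw [G1seg (fun c hc => by have := hva c hc; intro he; subst he; simp at this) T₂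
            (fun q hq => (ent_good q (by rw [hT]; simp [hq])).1), hT, List.foldl_append,
            List.foldl_cons]
          exact rfl
      _ = p.2 ++ scanB (t.drop (p.1.length - 1)) := by
          rw [hdrop] at ih
          rw [hdrop, ih]
  | case3 c t hfm ih =>
    have hn := FM_none entTable hfm
    by_cases hc : c = '&'
    · subst hc
      rw [G2 entTable ent_good t hn, ih]
    · rw [G1 hc entTable (fun q hq => (ent_good q hq).1) t, ih]


theorem bridge1 (T : List (String × String)) :
    ∀ s : String, (List.foldl (fun w p => PySem.Str.replace w p.1 p.2) s T).toList =
      List.foldl (fun l p => PySem.Chars.replace l p.1.toList p.2.toList) s.toList T := by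
  induction T with
  | nil => intro s; rfl
  | cons p ps ih =>
    intro s
    rw [List.foldl_cons, List.foldl_cons, ih, PySem.Str.toList_replace]

theorem bridge2 (T : List (String × String)) (h : ∀ p ∈ T, p.1.toList.isEmpty = false) :
    ∀ l, List.foldl (fun l p => PySem.Chars.replace l p.1.toList p.2.toList) l T =
      List.foldl stepA l (T.map fun p => (p.1.toList, p.2.toList)) := by
  induction T with
  | nil => simp
  | cons p ps ih =>
    intro l
    rw [List.foldl_cons, List.map_cons, List.foldl_cons,
      replace_eq_rep _ _ _ (h p (by simp)), ih (fun q hq => h q (by simp [hq]))]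
    exact rfl

theorem A_char (w : String) : (clean_str w).toList = List.foldl stepA w.toList entTable := by
  simp only [clean_str]
  rw [bridge1, bridge2 _ (by decide)]
  congr 1

-- ===== VERDICT (by name: the statement is the Claim_ definition above) =====
theorem clean_str_spec : Claim_equal_clean_str := by
  intro word _
  show clean_str word = clean_str_alt word
  apply String.toList_inj.mp
  rw [A_char, clean_str_alt, String.toList_ofList, main_scan]
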